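-- pv_equiv track=rewrite | github.com/kirk0830/abacus_orbital_generation | SIAB/spillage/guess.py | _nband_infer_from_hund
-- ===== SOURCE A (Python) =====
-- def _elem_z(elem):
--     """get the atomic number of the element
--
--     Parameters
--     ----------
--     elem: str
--         the element symbol
--
--     Returns
--     -------
--     int: the atomic number
--     """
--     z = {"H": 1, "He": 2, "Li": 3, "Be": 4, "B": 5, "C": 6, "N": 7, "O": 8, "F": 9, "Ne": 10,
--          "Na": 11, "Mg": 12, "Al": 13, "Si": 14, "P": 15, "S": 16, "Cl": 17, "Ar": 18, "K": 19,
--          "Ca": 20, "Sc": 21, "Ti": 22, "V": 23, "Cr": 24, "Mn": 25, "Fe": 26, "Co": 27, "Ni": 28,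
--          "Cu": 29, "Zn": 30, "Ga": 31, "Ge": 32, "As": 33, "Se": 34, "Br": 35, "Kr": 36, "Rb": 37,
--          "Sr": 38, "Y": 39, "Zr": 40, "Nb": 41, "Mo": 42, "Tc": 43, "Ru": 44, "Rh": 45, "Pd": 46,
--          "Ag": 47, "Cd": 48, "In": 49, "Sn": 50, "Sb": 51, "Te": 52, "I": 53, "Xe": 54, "Cs": 55,
--          "Ba": 56, "La": 57, "Ce": 58, "Pr": 59, "Nd": 60, "Pm": 61, "Sm": 62, "Eu": 63, "Gd": 64,
--          "Tb": 65, "Dy": 66, "Ho": 67, "Er": 68, "Tm": 69, "Yb": 70, "Lu": 71, "Hf": 72, "Ta": 73,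
--          "W": 74, "Re": 75, "Os": 76, "Ir": 77, "Pt": 78, "Au": 79, "Hg": 80, "Tl": 81, "Pb": 82,
--          "Bi": 83, "Po": 84, "At": 85, "Rn": 86, "Fr": 87, "Ra": 88, "Ac": 89, "Th": 90, "Pa": 91,
--          "U": 92, "Np": 93, "Pu": 94, "Am": 95, "Cm": 96, "Bk": 97, "Cf": 98, "Es": 99, "Fm": 100,
--          "Md": 101, "No": 102, "Lr": 103, "Rf": 104, "Db": 105, "Sg": 106, "Bh": 107, "Hs": 108,
--          "Mt": 109, "Ds": 110, "Rg": 111, "Cn": 112, "Nh": 113, "Fl": 114, "Mc": 115, "Lv": 116,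
--          "Ts": 117, "Og": 118, "Uue": 119}
--     return z[elem]
--
-- def _nband_infer_from_hund(elem, nzeta_max, zval = None):
--     """calculate the nband that should be calculated for including all radial functions
--     according to Hund's rule that required by nzeta_max, which returned by _make_guess
--     function.
--
--     Parameters
--     ----------
--     elem: str
--         the element symbol
--     nzeta_max: list[int]
--         the maximal number of zeta functions for each l
--     zval: int, optional
--         the valence charge, used for pseudopotential case, default is 0
--
--     Returns
--     -------
--     int: the number of bands to be calculated
--
--     Notes
--     -----
--     The function works in the following way (take Si as example):
--     ```
--     Si: 1s 2s 2p 3s 3p 4s ...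
--      |--- z = 14 --->|
--                | <-- | zval = 4
--                | --- nzeta_max --- >
--     ```
--     , therefore if zval = 0 (or not set), the number of bands to calculate will first
--     include all 3p states (all partially occupied states), then count the number of bands
--     starting from 4s. The zval should be read from pseudopotential.
--     """
--     assert len(nzeta_max) <= 4, "It is not possible to use atomic method initialize \
-- orbitals with l >= 3 (f orbitals), because g-orbitals are not observed in nature."
--
--     # if zval not set, set it to 0
--     zval = zval or 0
--
--     # (n, l)-pairs
--     ener_levels = [(1, 0), # 1s
--                    (2, 0), (2, 1), # 2s, 2p
--                    (3, 0), (3, 1), # 3s, 3p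
--                    (4, 0), # 4s
--                    (3, 2), (4, 1), (5, 0), # 3d, 4p, 5s
--                    (4, 2), (5, 1), (6, 0), # 4d, 5p, 6s
--                    (4, 3), (5, 2), (6, 1), (7, 0), # 4f, 5d, 6p, 7s
--                    (5, 3), (6, 2), (7, 1), (8, 0)] # 5f, 6d, 7p, 8s -> Z = 120
--
--     nband = 0
--
--     zcore = _elem_z(elem) - zval
--     z_accumu = 0
--
--     i = 0
--     for n, l in ener_levels:
--         z_accumu += 2*(2*l + 1)
--         i += 1
--         if z_accumu >= zcore: # reach the core, if zval = 0, means all electrons are frozen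
--             break
--
--     # if z_accumu != zcore, it means there are partially occupied states, first fill them
--     nband += (z_accumu - zcore)//2
--
--     # starting from the next level, fill the rest
--     nzeta_rest = nzeta_max.copy()
--     for n, l in ener_levels[i:]:
--         nzeta_rest[l] -= 1
--         nband += (2*l + 1)
--         if all([nzeta <= 0 for nzeta in nzeta_rest]):
--             break
--
--     return max(nband, zval // 2)
-- ===== SOURCE B (Python) =====
-- # B: phase 1 replaced by binary search on a hard-coded cumulative-capacity table;
-- # phase 2 replaced by a declarative search for the first prefix of the remaining
-- # levels whose per-l level counts cover nzeta_max, then one sum over that prefix.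
-- def _elem_z(elem):
--     z = {"H": 1, "He": 2, "Li": 3, "Be": 4, "B": 5, "C": 6, "N": 7, "O": 8, "F": 9, "Ne": 10,
--          "Na": 11, "Mg": 12, "Al": 13, "Si": 14, "P": 15, "S": 16, "Cl": 17, "Ar": 18, "K": 19,
--          "Ca": 20, "Sc": 21, "Ti": 22, "V": 23, "Cr": 24, "Mn": 25, "Fe": 26, "Co": 27, "Ni": 28,
--          "Cu": 29, "Zn": 30, "Ga": 31, "Ge": 32, "As": 33, "Se": 34, "Br": 35, "Kr": 36, "Rb": 37,
--          "Sr": 38, "Y": 39, "Zr": 40, "Nb": 41, "Mo": 42, "Tc": 43, "Ru": 44, "Rh": 45, "Pd": 46,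
--          "Ag": 47, "Cd": 48, "In": 49, "Sn": 50, "Sb": 51, "Te": 52, "I": 53, "Xe": 54, "Cs": 55,
--          "Ba": 56, "La": 57, "Ce": 58, "Pr": 59, "Nd": 60, "Pm": 61, "Sm": 62, "Eu": 63, "Gd": 64,
--          "Tb": 65, "Dy": 66, "Ho": 67, "Er": 68, "Tm": 69, "Yb": 70, "Lu": 71, "Hf": 72, "Ta": 73,
--          "W": 74, "Re": 75, "Os": 76, "Ir": 77, "Pt": 78, "Au": 79, "Hg": 80, "Tl": 81, "Pb": 82,
--          "Bi": 83, "Po": 84, "At": 85, "Rn": 86, "Fr": 87, "Ra": 88, "Ac": 89, "Th": 90, "Pa": 91,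
--          "U": 92, "Np": 93, "Pu": 94, "Am": 95, "Cm": 96, "Bk": 97, "Cf": 98, "Es": 99, "Fm": 100,
--          "Md": 101, "No": 102, "Lr": 103, "Rf": 104, "Db": 105, "Sg": 106, "Bh": 107, "Hs": 108,
--          "Mt": 109, "Ds": 110, "Rg": 111, "Cn": 112, "Nh": 113, "Fl": 114, "Mc": 115, "Lv": 116,
--          "Ts": 117, "Og": 118, "Uue": 119}
--     return z[elem]
--
-- # cumulative electron capacities of the aufbau levels 1s..8s, and their l values
-- _CUMS = [2, 4, 10, 12, 18, 20, 30, 36, 38, 48, 54, 56, 70, 80, 86, 88, 102, 112, 118, 120]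
-- _LS = [0, 0, 1, 0, 1, 0, 2, 1, 0, 2, 1, 0, 3, 2, 1, 0, 3, 2, 1, 0]
--
-- def _covered(prefix, nzeta_max):
--     """does this run of levels provide enough functions for every l-channel?"""
--     cnt = [0] * len(nzeta_max)
--     for l in prefix:
--         cnt[l] += 1
--     return all(k <= c for k, c in zip(nzeta_max, cnt))
--
-- def _nband_infer_from_hund(elem, nzeta_max, zval=None):
--     assert len(nzeta_max) <= 4, "It is not possible to use atomic method initialize \
-- orbitals with l >= 3 (f orbitals), because g-orbitals are not observed in nature."
--     zv = zval or 0
--     zcore = _elem_z(elem) - zv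
--     # leftmost cumulative capacity >= zcore, by binary search on the sorted table
--     lo, hi = 0, len(_CUMS)
--     while lo < hi:
--         mid = (lo + hi) // 2
--         if _CUMS[mid] < zcore:
--             lo = mid + 1
--         else:
--             hi = mid
--     i = min(lo, len(_CUMS) - 1) + 1
--     nband = (_CUMS[i - 1] - zcore) // 2
--     rest = _LS[i:]
--     # first prefix of rest whose per-l level counts cover nzeta_max (whole rest if none)
--     stop = next((t for t in range(1, len(rest) + 1) if _covered(rest[:t], nzeta_max)),
--                 len(rest))
--     nband += sum(2 * x + 1 for x in rest[:stop])
--     return max(nband, zv // 2)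
-- ===== Notes on version B (the rewrite author's own statement) =====
-- stated objective: alternative
-- what changed: Phase 1's accumulate-and-break scan is replaced by binary search over a hard-coded sorted cumulative-capacity table, and phase 2's stateful decrement-and-break simulation is replaced by a declarative search for the first prefix of the remaining levels whose per-l bucket counts cover nzeta_max, followed by a single sum over that prefix.
import Mathlib
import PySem

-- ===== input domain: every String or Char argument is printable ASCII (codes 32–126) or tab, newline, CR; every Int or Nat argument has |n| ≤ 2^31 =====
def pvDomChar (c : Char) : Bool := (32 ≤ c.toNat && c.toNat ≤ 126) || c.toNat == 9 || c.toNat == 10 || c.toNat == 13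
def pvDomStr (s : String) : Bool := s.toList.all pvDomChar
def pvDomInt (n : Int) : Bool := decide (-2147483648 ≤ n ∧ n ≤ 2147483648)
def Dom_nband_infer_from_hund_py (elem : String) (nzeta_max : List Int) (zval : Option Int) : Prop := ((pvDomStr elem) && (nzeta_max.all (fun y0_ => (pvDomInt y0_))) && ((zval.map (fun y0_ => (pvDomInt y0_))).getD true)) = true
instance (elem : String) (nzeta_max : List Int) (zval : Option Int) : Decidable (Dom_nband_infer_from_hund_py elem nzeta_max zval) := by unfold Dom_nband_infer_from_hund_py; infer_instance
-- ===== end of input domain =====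

-- B replaces A's phase-1 accumulate-and-break scan by binary search on a hard-coded sorted
-- cumulative-capacity table, and A's phase-2 decrement-and-break simulation by a declarative
-- first-satisfying-prefix search plus one sum over that prefix (objective: alternative).

-- shared data helper: the module's element → atomic-number dict (_elem_z); lookup of a missing key is
-- Python's KeyError = none here
def pvElemZTable : List (String × Int) := [("H", 1), ("He", 2), ("Li", 3), ("Be", 4), ("B", 5), ("C", 6), ("N", 7), ("O", 8), ("F", 9), ("Ne", 10), ("Na", 11), ("Mg", 12), ("Al", 13), ("Si", 14), ("P", 15), ("S", 16), ("Cl", 17), ("Ar", 18), ("K", 19), ("Ca", 20), ("Sc", 21), ("Ti", 22), ("V", 23), ("Cr", 24), ("Mn", 25), ("Fe", 26), ("Co", 27), ("Ni", 28), ("Cu", 29), ("Zn", 30), ("Ga", 31), ("Ge", 32), ("As", 33), ("Se", 34), ("Br", 35), ("Kr", 36), ("Rb", 37), ("Sr", 38), ("Y", 39), ("Zr", 40), ("Nb", 41), ("Mo", 42), ("Tc", 43), ("Ru", 44), ("Rh", 45), ("Pd", 46), ("Ag", 47), ("Cd", 48), ("In", 49), ("Sn", 50), ("Sb", 51), ("Te",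 52), ("I", 53), ("Xe", 54), ("Cs", 55), ("Ba", 56), ("La", 57), ("Ce", 58), ("Pr", 59), ("Nd", 60), ("Pm", 61), ("Sm", 62), ("Eu", 63), ("Gd", 64), ("Tb", 65), ("Dy", 66), ("Ho", 67), ("Er", 68), ("Tm", 69), ("Yb", 70), ("Lu", 71), ("Hf", 72), ("Ta", 73), ("W", 74), ("Re", 75), ("Os", 76), ("Ir", 77), ("Pt", 78), ("Au", 79), ("Hg", 80), ("Tl", 81), ("Pb", 82), ("Bi", 83), ("Po", 84), ("At", 85), ("Rn", 86), ("Fr", 87), ("Ra", 88), ("Ac", 89), ("Th", 90), ("Pa", 91), ("U", 92), ("Np", 93), ("Pu", 94), ("Am", 95), ("Cm", 96), ("Bk", 97), ("Cf", 98), ("Es", 99), ("Fm", 100), ("Md", 101), ("No", 102), ("Lr", 103), ("Rf", 104), ("Db", 105), ("Sg", 106), ("Bh", 107), ("Hs", 108), ("Mt", 109), ("Ds", 110), ("Rg", 111), ("Cn", 112), ("Nh", 113), ("Fl", 114), ("Mc", 115), ("Lv", 116), ("Ts", 117), ("Og", 118), ("Uue", 119)]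

def pvElemZ? (elem : String) : Option Int := pvElemZTable.lookup elem

-- ===== PORT A =====
-- the (n, l) energy-level table of A
def pvEnerLevels : List (Int × Int) := [(1,0),(2,0),(2,1),(3,0),(3,1),(4,0),(3,2),(4,1),(5,0),(4,2),(5,1),(6,0),(4,3),(5,2),(6,1),(7,0),(5,3),(6,2),(7,1),(8,0)]

-- A's first loop: accumulate 2*(2l+1), count levels, break when z_accumu >= zcore
def pvPhase1 (zcore : Int) : List (Int × Int) → Int → Int × Nat
  | [], acc => (acc, 0)
  | nl :: t, acc =>
    if zcore ≤ acc + 2 * (2 * nl.2 + 1) then (acc + 2 * (2 * nl.2 + 1), 1)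
    else
      let r := pvPhase1 zcore t (acc + 2 * (2 * nl.2 + 1))
      (r.1, r.2 + 1)

-- A's second loop: decrement nzeta_rest[l], add 2l+1, break when all entries ≤ 0.
-- Python raises IndexError when l is out of range (excluded by Pre_); the port totalises that step as a no-op set.
def pvPhase2A : List (Int × Int) → List Int → Int
  | [], _ => 0
  | nl :: t, rem =>
    let rem' := rem.set nl.2.toNat (rem.getD nl.2.toNat 0 - 1)
    (2 * nl.2 + 1) + (if rem'.all (fun x => decide (x ≤ 0)) then 0 else pvPhase2A t rem')

def nband_infer_from_hund_py (elem : String) (nzeta_max : List Int) (zval : Option Int) : Int :=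
  if nzeta_max.length ≤ 4 then
    match pvElemZ? elem with
    | none => 0   -- KeyError in Python; excluded by Pre_
    | some z =>
      let zv := match zval with | none => 0 | some v => if v = 0 then 0 else v   -- zval or 0
      let zcore := z - zv
      let r := pvPhase1 zcore pvEnerLevels 0
      let nband := PySem.Int.floordiv (r.1 - zcore) 2 + pvPhase2A (pvEnerLevels.drop r.2) nzeta_max
      max nband (PySem.Int.floordiv zv 2)
  else 0   -- AssertionError in Python; excluded by Pre_

-- ===== PORT B =====
-- B's hard-coded tables: cumulative electron capacities of 1s..8s, and the l values
def pvCums : List Int := [2, 4, 10, 12, 18, 20, 30, 36, 38, 48, 54, 56, 70, 80, 86, 88, 102, 112, 118, 120]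
def pvLs : List Int := [0, 0, 1, 0, 1, 0, 2, 1, 0, 2, 1, 0, 3, 2, 1, 0, 3, 2, 1, 0]

-- B's while-loop binary search: leftmost index with pvCums[idx] >= z
def pvBsearch (z : Int) (lo hi : Nat) : Nat :=
  if h : lo < hi then
    if pvCums.getD ((lo + hi) / 2) 0 < z then pvBsearch z ((lo + hi) / 2 + 1) hi
    else pvBsearch z lo ((lo + hi) / 2)
  else lo
termination_by hi - lo
decreasing_by all_goals omega

-- B's _covered helper: bucket-count the levels of the prefix (cnt[l] += 1), then compare with
-- nzeta_max via zip. Python raises IndexError at cnt[l] when l ≥ len(nzeta_max) (excluded by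
-- Pre_); the port totalises that step as a no-op set.
def pvCnt : List Int → List Int → List Int
  | [], cnt => cnt
  | l :: t, cnt => pvCnt t (cnt.set l.toNat (cnt.getD l.toNat 0 + 1))

def pvCovered (pre nz : List Int) : Bool :=
  (nz.zip (pvCnt pre (List.replicate nz.length 0))).all (fun p => decide (p.1 ≤ p.2))

-- B's next(...) over range(1, len(rest)+1) with default len(rest)
def pvStop (rest : List Int) (nz : List Int) : Nat :=
  match (List.range' 1 rest.length).find? (fun t => pvCovered (rest.take t) nz) with
  | some t => t
  | none => rest.length

def nband_infer_from_hund_py_alt (elem : String) (nzeta_max : List Int) (zval : Option Int) : Int :=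
  if nzeta_max.length ≤ 4 then
    match pvElemZ? elem with
    | none => 0   -- KeyError in Python; excluded by Pre_
    | some z =>
      let zv := match zval with | none => 0 | some v => if v = 0 then 0 else v   -- zval or 0
      let zcore := z - zv
      let i := min (pvBsearch zcore 0 20) 19 + 1
      let nband := PySem.Int.floordiv (pvCums.getD (i - 1) 0 - zcore) 2
      let rest := pvLs.drop i
      let stop := pvStop rest nzeta_max
      max (nband + ((rest.take stop).map (fun x => 2 * x + 1)).sum) (PySem.Int.floordiv zv 2)
  else 0   -- AssertionError in Python; excluded by Pre_

-- ===== PRECONDITION & SPEC =====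
-- helpers for Pre_, stated on fixed data (no loop of either port is run):
-- the list of l-values A's second loop runs over: levels after the first one whose cumulative capacity reaches zcore
def pvRestOf (elem : String) (zval : Option Int) : List Int :=
  pvLs.drop (pvCums.findIdx (fun c => decide ((pvElemZ? elem).getD 0 - zval.getD 0 ≤ c)) + 1)

-- Pre_ excludes exactly the inputs where the Python raises: an element symbol not in the dict (KeyError),
-- len(nzeta_max) > 4 (AssertionError), and second-phase runs that reach a level with l ≥ len(nzeta_max)
-- before every l-channel is exhausted (IndexError at nzeta_rest[l] -= 1).
def Pre_nband_infer_from_hund_py (elem : String) (nzeta_max : List Int) (zval : Option Int) : Prop :=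
  (pvElemZ? elem).isSome = true ∧ nzeta_max.length ≤ 4 ∧
  (∀ p, p < (pvRestOf elem zval).length → (nzeta_max.length : Int) ≤ (pvRestOf elem zval).getD p 0 →
    ∃ t, t < p ∧ ∀ j, j < nzeta_max.length →
      nzeta_max.getD j 0 ≤ ((((pvRestOf elem zval).take (t + 1)).count ((j : Int))) : Int))
instance (elem : String) (nzeta_max : List Int) (zval : Option Int) : Decidable (Pre_nband_infer_from_hund_py elem nzeta_max zval) := by unfold Pre_nband_infer_from_hund_py; infer_instance

def pvWitness_nband_infer_from_hund_py : String × List Int × Option Int := ("Si", [2, 2, 1], none)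

def Spec_nband_infer_from_hund_py (elem : String) (nzeta_max : List Int) (zval : Option Int) (out : Int) : Prop := out = nband_infer_from_hund_py_alt elem nzeta_max zval
instance (elem : String) (nzeta_max : List Int) (zval : Option Int) (out : Int) : Decidable (Spec_nband_infer_from_hund_py elem nzeta_max zval out) := by unfold Spec_nband_infer_from_hund_py; infer_instance

-- ===== CLAIM (what is proved, stated in full; the proofs are below) =====
def Claim_equal_nband_infer_from_hund_py : Prop := ∀ (elem : String) (nzeta_max : List Int) (zval : Option Int), Dom_nband_infer_from_hund_py elem nzeta_max zval → Pre_nband_infer_from_hund_py elem nzeta_max zval → Spec_nband_infer_from_hund_py elem nzeta_max zval (nband_infer_from_hund_py elem nzeta_max zval)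

-- ===== LEMMAS AND PROOFS =====

theorem pvWitness_ok : Dom_nband_infer_from_hund_py pvWitness_nband_infer_from_hund_py.1 pvWitness_nband_infer_from_hund_py.2.1 pvWitness_nband_infer_from_hund_py.2.2 ∧ Pre_nband_infer_from_hund_py pvWitness_nband_infer_from_hund_py.1 pvWitness_nband_infer_from_hund_py.2.1 pvWitness_nband_infer_from_hund_py.2.2 := by
  constructor <;> decide

-- proof-only helpers: a linear characterisation of A's first loop (cumulative sums + first index)
def pvBuildCums : List Int → Int → List Int
  | [], _ => []
  | l :: t, tot => (tot + 2 * (2 * l + 1)) :: pvBuildCums t (tot + 2 * (2 * l + 1))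

def pvBreakIdx (zcore : Int) (cums : List Int) (n : Nat) : Nat :=
  match cums.findIdx? (fun c => decide (zcore ≤ c)) with
  | some j => j + 1
  | none => n

theorem pvBuildCums_length (ls : List Int) (tot : Int) : (pvBuildCums ls tot).length = ls.length := by
  induction ls generalizing tot with
  | nil => rfl
  | cons l t ih => simp [pvBuildCums, ih]

theorem pvPhase1_idx (zcore : Int) (lv : List (Int × Int)) (acc : Int) :
    (pvPhase1 zcore lv acc).2 = pvBreakIdx zcore (pvBuildCums (lv.map Prod.snd) acc) lv.length := by
  induction lv generalizing acc with
  | nil => simp [pvPhase1, pvBuildCums, pvBreakIdx]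
  | cons nl t ih =>
    simp only [pvPhase1, List.map_cons, pvBuildCums, pvBreakIdx, List.findIdx?_cons]
    by_cases h : zcore ≤ acc + 2 * (2 * nl.2 + 1)
    · simp [h]
    · simp only [decide_eq_true_eq, if_neg h]
      have := ih (acc + 2 * (2 * nl.2 + 1))
      cases h2 : (pvBuildCums (t.map Prod.snd) (acc + 2 * (2 * nl.2 + 1))).findIdx? (fun c => decide (zcore ≤ c)) with
      | none => simp [pvBreakIdx, h2] at this; simp [this, Option.map]
      | some j => simp [pvBreakIdx, h2] at this; simp [this, Option.map]

theorem pvPhase1_le (zcore : Int) (lv : List (Int × Int)) (acc : Int) :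
    (pvPhase1 zcore lv acc).2 ≤ lv.length := by
  induction lv generalizing acc with
  | nil => simp [pvPhase1]
  | cons nl t ih =>
    simp only [pvPhase1]
    by_cases h : zcore ≤ acc + 2 * (2 * nl.2 + 1)
    · simp [h]
    · simpa [h] using ih (acc + 2 * (2 * nl.2 + 1))

theorem pvPhase1_val (zcore : Int) (lv : List (Int × Int)) (acc : Int) :
    (pvPhase1 zcore lv acc).1 = (acc :: pvBuildCums (lv.map Prod.snd) acc).getD (pvPhase1 zcore lv acc).2 acc := by
  induction lv generalizing acc with
  | nil => simp [pvPhase1]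
  | cons nl t ih =>
    simp only [pvPhase1, List.map_cons, pvBuildCums]
    by_cases h : zcore ≤ acc + 2 * (2 * nl.2 + 1)
    · simp [h]
    · simp only [if_neg h]
      have hv := ih (acc + 2 * (2 * nl.2 + 1))
      have hle := pvPhase1_le zcore t (acc + 2 * (2 * nl.2 + 1))
      show (pvPhase1 zcore t (acc + 2 * (2 * nl.2 + 1))).1 = _
      rw [List.getD_cons_succ]
      rw [hv]
      have hlen : (pvPhase1 zcore t (acc + 2 * (2 * nl.2 + 1))).2 < ((acc + 2 * (2 * nl.2 + 1)) :: pvBuildCums (t.map Prod.snd) (acc + 2 * (2 * nl.2 + 1))).length := by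
        simp [pvBuildCums_length]
        omega
      rw [List.getD_eq_getElem _ _ hlen, List.getD_eq_getElem _ _ (by simpa using hlen)]

theorem pvCums_sorted_aux : ∀ j, j < 20 → ∀ i, i < 20 → i ≤ j → pvCums.getD i 0 ≤ pvCums.getD j 0 := by decide

theorem pvCums_sorted (i j : Nat) (hij : i ≤ j) (hj : j < 20) : pvCums.getD i 0 ≤ pvCums.getD j 0 :=
  pvCums_sorted_aux j hj i (by omega) hij

-- correctness of B's binary search over the fixed sorted table
theorem pvBsearch_spec (z : Int) (n : Nat) : ∀ lo hi : Nat, hi - lo ≤ n → lo ≤ hi → hi ≤ 20 →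
    (∀ j, j < lo → pvCums.getD j 0 < z) →
    (∀ j, hi ≤ j → j < 20 → z ≤ pvCums.getD j 0) →
    lo ≤ pvBsearch z lo hi ∧ pvBsearch z lo hi ≤ hi ∧
    (∀ j, j < pvBsearch z lo hi → pvCums.getD j 0 < z) ∧
    (pvBsearch z lo hi < 20 → z ≤ pvCums.getD (pvBsearch z lo hi) 0) := by
  induction n with
  | zero =>
    intro lo hi hn hle h20 hlo hhi
    have : lo = hi := by omega
    subst this
    rw [pvBsearch, dif_neg (by omega)]
    exact ⟨le_refl _, le_refl _, hlo, fun h => hhi lo (le_refl _) h⟩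
  | succ n ih =>
    intro lo hi hn hle h20 hlo hhi
    rw [pvBsearch]
    by_cases hlt : lo < hi
    · rw [dif_pos hlt]
      by_cases hc : pvCums.getD ((lo + hi) / 2) 0 < z
      · rw [if_pos hc]
        have hr := ih ((lo + hi) / 2 + 1) hi (by omega) (by omega) h20
          (fun j hj => by
            by_cases hjlo : j < lo
            · exact hlo j hjlo
            · calc pvCums.getD j 0 ≤ pvCums.getD ((lo + hi) / 2) 0 :=
                    pvCums_sorted j _ (by omega) (by omega)
                _ < z := hc)
          hhi
        exact ⟨by omega, hr.2.1, hr.2.2.1, hr.2.2.2⟩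
      · rw [if_neg hc]
        have hr := ih lo ((lo + hi) / 2) (by omega) (by omega) (by omega) hlo
          (fun j hj hj20 =>
            calc z ≤ pvCums.getD ((lo + hi) / 2) 0 := by omega
              _ ≤ pvCums.getD j 0 := pvCums_sorted _ j hj hj20)
        exact ⟨hr.1, by omega, hr.2.2.1, hr.2.2.2⟩
    · rw [dif_neg hlt]
      have : lo = hi := by omega
      subst this
      exact ⟨le_refl _, le_refl _, hlo, fun h => hhi lo (le_refl _) h⟩

theorem pvCums_length : pvCums.length = 20 := by decide

theorem pvBreakIdx_eq_bsearch (z : Int) :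
    pvBreakIdx z pvCums 20 = min (pvBsearch z 0 20) 19 + 1 := by
  obtain ⟨h0, h20, hbelow, hat⟩ := pvBsearch_spec z 20 0 20 (by omega) (by omega) (le_refl _)
    (fun j hj => absurd hj (by omega)) (fun j hj hj20 => absurd hj20 (by omega))
  unfold pvBreakIdx
  cases h : pvCums.findIdx? (fun c => decide (z ≤ c)) with
  | none =>
    have hnone := List.findIdx?_eq_none_iff.mp h
    have hr20 : pvBsearch z 0 20 = 20 := by
      by_contra hne
      have hlt : pvBsearch z 0 20 < 20 := by omega
      have hz := hat hlt
      have hmem : pvCums.getD (pvBsearch z 0 20) 0 ∈ pvCums := by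
        rw [List.getD_eq_getElem _ _ (by rw [pvCums_length]; omega)]
        exact List.getElem_mem _
      have hfalse := hnone _ hmem
      rw [decide_eq_false_iff_not] at hfalse
      exact hfalse hz
    show (20 : Nat) = _
    omega
  | some j =>
    obtain ⟨hjlen, hpj, hklt⟩ := List.findIdx?_eq_some_iff_getElem.mp h
    rw [pvCums_length] at hjlen
    simp only [decide_eq_true_eq] at hpj hklt
    have hrj : pvBsearch z 0 20 = j := by
      by_contra hne
      rcases Nat.lt_or_ge (pvBsearch z 0 20) j with hlt | hge
      · have hnk := hklt _ hlt
        have hz := hat (by omega)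
        rw [List.getD_eq_getElem _ _ (by rw [pvCums_length]; omega)] at hz
        exact hnk hz
      · have hjr : j < pvBsearch z 0 20 := by omega
        have hlt2 := hbelow j hjr
        rw [List.getD_eq_getElem _ _ (by rw [pvCums_length]; omega)] at hlt2
        omega
    show j + 1 = _
    omega

-- phase 1: A's break loop equals B's binary search (index and accumulated value)
theorem pvPhase1_eq_bsearch (z : Int) :
    (pvPhase1 z pvEnerLevels 0).2 = min (pvBsearch z 0 20) 19 + 1 ∧
    (pvPhase1 z pvEnerLevels 0).1 = pvCums.getD (min (pvBsearch z 0 20) 19) 0 := by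
  have hidx := pvPhase1_idx z pvEnerLevels 0
  have hcums : pvBuildCums (pvEnerLevels.map Prod.snd) 0 = pvCums := by decide
  have hlen : pvEnerLevels.length = 20 := by decide
  rw [hcums, hlen, pvBreakIdx_eq_bsearch] at hidx
  refine ⟨hidx, ?_⟩
  have hval := pvPhase1_val z pvEnerLevels 0
  rw [hcums, hidx] at hval
  rw [hval, List.getD_cons_succ]

-- A's phase-2 loop, restated on the l-values only
def pvPhase2L : List Int → List Int → Int
  | [], _ => 0
  | l :: t, rem =>
    let rem' := rem.set l.toNat (rem.getD l.toNat 0 - 1)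
    (2 * l + 1) + (if rem'.all (fun x => decide (x ≤ 0)) then 0 else pvPhase2L t rem')

theorem pvPhase2A_eq_L (lv : List (Int × Int)) (rem : List Int) :
    pvPhase2A lv rem = pvPhase2L (lv.map Prod.snd) rem := by
  induction lv generalizing rem with
  | nil => rfl
  | cons nl t ih => simp only [pvPhase2A, pvPhase2L, List.map_cons]; rw [ih]

-- proof-only: a count-based characterisation of B's prefix predicate and stop search
def pvSat (rest : List Int) (nz : List Int) (t : Nat) : Bool :=
  (List.range nz.length).all (fun j => decide (nz.getD j 0 ≤ ((rest.take t).count ((j : Nat) : Int) : Int)))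

def pvStopL (rest : List Int) (nz : List Int) : Nat :=
  match (List.range' 1 rest.length).find? (fun t => pvSat rest nz t) with
  | some t => t
  | none => rest.length

theorem pvCnt_length (p c : List Int) : (pvCnt p c).length = c.length := by
  induction p generalizing c with
  | nil => rfl
  | cons l t ih => simp [pvCnt, ih]

theorem pvCnt_getD (p : List Int) : ∀ (c : List Int) (j : Nat), (∀ x ∈ p, 0 ≤ x) → j < c.length →
    (pvCnt p c).getD j 0 = c.getD j 0 + ((p.count ((j : Nat) : Int) : Nat) : Int) := by
  induction p with
  | nil => intro c j _ hj; simp [pvCnt]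
  | cons l t ih =>
    intro c j hpos hj
    have hl : 0 ≤ l := hpos l (by simp)
    simp only [pvCnt]
    rw [ih _ j (fun x hx => hpos x (by simp [hx])) (by rw [List.length_set]; exact hj)]
    simp only [List.count_cons]
    by_cases hje : l = ((j : Nat) : Int)
    · have hbeq : (l == ((j : Nat) : Int)) = true := by simpa using hje
      have hjt : j = l.toNat := by omega
      subst hjt
      rw [List.getD_eq_getElem _ _ (by rw [List.length_set]; omega), List.getElem_set_self,
        List.getD_eq_getElem _ _ hj]
      simp only [hbeq, if_true]
      push_cast
      omega
    · have hbeq : (l == ((j : Nat) : Int)) = false := by simpa using hje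
      have hjne : l.toNat ≠ j := by omega
      rw [List.getD_eq_getElem _ _ (by rw [List.length_set]; omega),
        List.getD_eq_getElem _ _ hj, List.getElem_set_ne hjne]
      simp [hbeq]

theorem pvZipAll (xs ys : List Int) (h : ys.length = xs.length) :
    ((xs.zip ys).all (fun p => decide (p.1 ≤ p.2)) = true) ↔ (∀ j, (hj : j < xs.length) → xs[j] ≤ ys[j]) := by
  rw [List.all_eq_true]
  constructor
  · intro hall j hj
    have hm : (xs[j], ys[j]) ∈ xs.zip ys := by
      have hjz : j < (xs.zip ys).length := by rw [List.length_zip]; omega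
      have := List.getElem_mem hjz
      rwa [List.getElem_zip] at this
    simpa using hall _ hm
  · intro hj x hx
    obtain ⟨i, hi, rfl⟩ := List.mem_iff_getElem.mp hx
    rw [List.getElem_zip]
    have hix : i < xs.length := by
      have := hi; rw [List.length_zip] at this; omega
    simpa using hj i hix

theorem pvCovered_eq_sat (rest nz : List Int) (t : Nat) (hpos : ∀ x ∈ rest, 0 ≤ x) :
    pvCovered (rest.take t) nz = pvSat rest nz t := by
  have hlen : (pvCnt (rest.take t) (List.replicate nz.length 0)).length = nz.length := by
    rw [pvCnt_length, List.length_replicate]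
  have hcnt : ∀ j, j < nz.length →
      (pvCnt (rest.take t) (List.replicate nz.length 0)).getD j 0 = (((rest.take t).count ((j : Nat) : Int) : Nat) : Int) := by
    intro j hj
    rw [pvCnt_getD _ _ j (fun x hx => hpos x (List.mem_of_mem_take hx)) (by rw [List.length_replicate]; exact hj)]
    rw [List.getD_eq_getElem _ _ (by rw [List.length_replicate]; exact hj), List.getElem_replicate]
    omega
  rw [Bool.eq_iff_iff]
  unfold pvCovered pvSat
  rw [pvZipAll _ _ hlen, List.all_eq_true]
  constructor
  · intro hall j hjm
    have hj := List.mem_range.mp hjm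
    have hjc : j < (pvCnt (rest.take t) (List.replicate nz.length 0)).length := by omega
    have hc := hcnt j hj
    rw [List.getD_eq_getElem _ _ hjc] at hc
    simp only [decide_eq_true_eq]
    rw [List.getD_eq_getElem _ _ hj, ← hc]
    exact hall j hj
  · intro hall j hj
    have hjc : j < (pvCnt (rest.take t) (List.replicate nz.length 0)).length := by omega
    have hc := hcnt j hj
    rw [List.getD_eq_getElem _ _ hjc] at hc
    have hx := hall j (List.mem_range.mpr hj)
    simp only [decide_eq_true_eq] at hx
    rw [List.getD_eq_getElem _ _ hj] at hx
    rw [hc]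
    exact hx

theorem pvStop_eq_L (rest nz : List Int) (hpos : ∀ x ∈ rest, 0 ≤ x) :
    pvStop rest nz = pvStopL rest nz := by
  unfold pvStop pvStopL
  have hfun : (fun t => pvCovered (rest.take t) nz) = (fun t => pvSat rest nz t) :=
    funext (fun t => pvCovered_eq_sat rest nz t hpos)
  rw [hfun]

theorem pvAllRangeCongr (n : Nat) (p q : Nat → Bool) (h : ∀ j, j < n → p j = q j) :
    (List.range n).all p = (List.range n).all q := by
  rw [Bool.eq_iff_iff, List.all_eq_true, List.all_eq_true]
  constructor <;> intro hh j hj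
  · rw [← h j (List.mem_range.mp hj)]; exact hh j hj
  · rw [h j (List.mem_range.mp hj)]; exact hh j hj

theorem pvSat_zero (rest nz : List Int) : pvSat rest nz 0 = nz.all (fun x => decide (x ≤ 0)) := by
  simp only [pvSat, List.take_zero, List.count_nil, Nat.cast_zero]
  rw [Bool.eq_iff_iff, List.all_eq_true, List.all_eq_true]
  constructor
  · intro h x hx
    obtain ⟨j, hj, rfl⟩ := List.mem_iff_getElem.mp hx
    have hthis := h j (List.mem_range.mpr hj)
    rw [List.getD_eq_getElem _ _ hj] at hthis
    simpa using hthis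
  · intro h j hjm
    have hj := List.mem_range.mp hjm
    have hmem : nz.getD j 0 ∈ nz := by
      rw [List.getD_eq_getElem _ _ hj]; exact List.getElem_mem hj
    simpa using h _ hmem

theorem pvSat_shift (l : Int) (hl : 0 ≤ l) (t rem : List Int) (s : Nat) :
    pvSat (l :: t) rem (s + 1) = pvSat t (rem.set l.toNat (rem.getD l.toNat 0 - 1)) s := by
  simp only [pvSat, List.take_succ_cons, List.length_set]
  refine pvAllRangeCongr _ _ _ (fun j hj => ?_)
  rw [decide_eq_decide]
  by_cases hje : l = ((j : Nat) : Int)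
  · have hbeq : (l == ((j : Nat) : Int)) = true := by simpa using hje
    have hjt : j = l.toNat := by omega
    by_cases hlen : j < rem.length
    · have hset : (rem.set l.toNat (rem.getD l.toNat 0 - 1)).getD j 0 = rem.getD j 0 - 1 := by
        rw [hjt]
        rw [List.getD_eq_getElem _ _ (by rw [List.length_set]; omega), List.getElem_set_self]
      rw [hset, List.count_cons]
      simp only [hbeq, if_true]
      push_cast
      omega
    · have hset : rem.set l.toNat (rem.getD l.toNat 0 - 1) = rem := by
        apply List.set_eq_of_length_le; omega
      rw [hset]
      have hgd : rem.getD j 0 = 0 := List.getD_eq_default _ _ (by omega)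
      rw [hgd, List.count_cons]
      constructor <;> intro _ <;> positivity
  · have hbeq : (l == ((j : Nat) : Int)) = false := by simpa using hje
    have hjne : l.toNat ≠ j := by omega
    have hset : (rem.set l.toNat (rem.getD l.toNat 0 - 1)).getD j 0 = rem.getD j 0 := by
      by_cases hlen : j < rem.length
      · rw [List.getD_eq_getElem _ _ (by rw [List.length_set]; omega),
          List.getD_eq_getElem _ _ hlen, List.getElem_set_ne hjne]
      · rw [List.getD_eq_default _ _ (by rw [List.length_set]; omega),
          List.getD_eq_default _ _ (by omega)]
    rw [hset, List.count_cons]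
    simp [hbeq]

theorem pvStopL_cons (l : Int) (hl : 0 ≤ l) (t rem : List Int) :
    pvStopL (l :: t) rem = if pvSat (l :: t) rem 1 then 1 else pvStopL t (rem.set l.toNat (rem.getD l.toNat 0 - 1)) + 1 := by
  simp only [pvStopL, List.length_cons]
  rw [List.range'_succ, List.find?_cons]
  by_cases h1 : pvSat (l :: t) rem 1
  · simp [h1]
  · rw [Bool.not_eq_true] at h1
    simp only [h1]
    rw [List.range'_eq_map_range, List.range'_eq_map_range, List.find?_map, List.find?_map]
    have hpred : ((fun c => pvSat (l :: t) rem c) ∘ (fun x => 1 + 1 + x))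
        = ((fun c => pvSat t (rem.set l.toNat (rem.getD l.toNat 0 - 1)) c) ∘ (fun x => 1 + x)) := by
      funext j
      show pvSat (l :: t) rem (1 + 1 + j) = pvSat t _ (1 + j)
      rw [show 1 + 1 + j = (1 + j) + 1 from by omega]
      exact pvSat_shift l hl t rem (1 + j)
    rw [hpred]
    cases hfind : List.find? ((fun c => pvSat t (rem.set l.toNat (rem.getD l.toNat 0 - 1)) c) ∘ (fun x => 1 + x)) (List.range t.length) with
    | none => simp
    | some j => simp; omega

theorem pvPhase2L_eq_prefix (rest rem : List Int) (hpos : ∀ x ∈ rest, 0 ≤ x) :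
    pvPhase2L rest rem = ((rest.take (pvStopL rest rem)).map (fun x => 2 * x + 1)).sum := by
  induction rest generalizing rem with
  | nil => simp [pvPhase2L, pvStopL]
  | cons l t ih =>
    have hl : 0 ≤ l := hpos l (by simp)
    have hsat1 : (rem.set l.toNat (rem.getD l.toNat 0 - 1)).all (fun x => decide (x ≤ 0)) = pvSat (l :: t) rem 1 := by
      rw [show (1:Nat) = 0 + 1 from rfl, pvSat_shift l hl, pvSat_zero]
    rw [pvStopL_cons l hl]
    by_cases hb : pvSat (l :: t) rem 1
    · simp only [pvPhase2L, hsat1, hb, if_pos]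
      simp
    · simp only [pvPhase2L, hsat1, hb, if_neg, Bool.false_eq_true, not_false_iff]
      rw [List.take_succ_cons, List.map_cons, List.sum_cons,
        ih (rem.set l.toNat (rem.getD l.toNat 0 - 1)) (fun x hx => hpos x (by simp [hx]))]

theorem pvLs_nonneg : ∀ x ∈ pvLs, (0:Int) ≤ x := by decide

-- ===== VERDICT (by name: the statement is the Claim_ definition above) =====
theorem nband_infer_from_hund_py_spec : Claim_equal_nband_infer_from_hund_py := by
  intro elem nzeta_max zval _ _
  unfold Spec_nband_infer_from_hund_py
  unfold nband_infer_from_hund_py nband_infer_from_hund_py_alt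
  by_cases h4 : nzeta_max.length ≤ 4
  · rw [if_pos h4, if_pos h4]
    cases hz : pvElemZ? elem with
    | none => rfl
    | some z =>
      simp only []
      set zv := (match zval with | none => (0:Int) | some v => if v = 0 then 0 else v) with hzv
      set zc := z - zv with hzc
      obtain ⟨hidx, hval⟩ := pvPhase1_eq_bsearch zc
      rw [hidx, hval]
      have hdrop : (pvEnerLevels.drop (min (pvBsearch zc 0 20) 19 + 1)).map Prod.snd
          = pvLs.drop (min (pvBsearch zc 0 20) 19 + 1) := by
        rw [List.map_drop]; rfl
      rw [pvPhase2A_eq_L, hdrop,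
        pvPhase2L_eq_prefix _ _ (fun x hx => pvLs_nonneg x (List.mem_of_mem_drop hx)),
        ← pvStop_eq_L _ _ (fun x hx => pvLs_nonneg x (List.mem_of_mem_drop hx))]
      simp
  · rw [if_neg h4, if_neg h4]
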